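-- pv_equiv track=rewrite | github.com/aralshi/Elements-of-AI | nqueen-nrook.py | under_attack
-- ===== SOURCE A (Python) =====
-- def under_attack(board, r, c):
--     for pos in board:
--         if (r == pos[0] or \
--             c == pos[1] or \
--             ((r - c) == (pos[0] - pos[1])) or \
--             ((r + c) == (pos[0] + pos[1]))):
--             return True
--     return False
-- ===== SOURCE B (Python) =====
-- def under_attack(board, r, c):
--     rows = {p[0] for p in board}
--     cols = {p[1] for p in board}
--     diffs = {p[0] - p[1] for p in board}
--     sums = {p[0] + p[1] for p in board}
--     return r in rows or c in cols or (r - c) in diffs or (r + c) in sums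
-- ===== Notes on version B (the rewrite author's own statement) =====
-- stated objective: alternative
-- what changed: Instead of a short-circuiting per-piece scan testing four conditions, B builds four sets indexing the attacked rows, columns and both diagonals and answers by four membership lookups.
import Mathlib
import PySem

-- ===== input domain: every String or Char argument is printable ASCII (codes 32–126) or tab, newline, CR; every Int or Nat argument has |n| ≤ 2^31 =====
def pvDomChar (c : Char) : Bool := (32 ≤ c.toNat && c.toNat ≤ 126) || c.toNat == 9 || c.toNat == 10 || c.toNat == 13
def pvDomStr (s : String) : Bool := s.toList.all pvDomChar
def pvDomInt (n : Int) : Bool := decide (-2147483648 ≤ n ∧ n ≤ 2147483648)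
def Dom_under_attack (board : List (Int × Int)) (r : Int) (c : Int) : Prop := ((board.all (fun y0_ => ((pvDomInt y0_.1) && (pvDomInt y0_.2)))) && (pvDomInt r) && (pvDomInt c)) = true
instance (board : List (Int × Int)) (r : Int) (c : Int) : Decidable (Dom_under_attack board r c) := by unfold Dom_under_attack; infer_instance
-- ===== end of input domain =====

-- B replaces A's short-circuiting per-piece scan by four sets indexing the attacked rows, columns and diagonals, answered by membership lookups (alternative structure, same cost).


-- ===== PORT A =====
-- A: scan the pieces, return True on the first one sharing a row, column or diagonal.
def under_attack (board : List (Int × Int)) (r : Int) (c : Int) : Bool :=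
  match board with
  | [] => false
  | pos :: rest =>
    if r == pos.1 || c == pos.2 || (r - c) == (pos.1 - pos.2) || (r + c) == (pos.1 + pos.2) then
      true
    else under_attack rest r c

-- ===== PORT B =====
-- B: index the attacked rows / columns / diagonals as four sets, then look up.
def under_attack_alt (board : List (Int × Int)) (r : Int) (c : Int) : Bool :=
  let rows : PySem.Set Int := PySem.Set.ofList (board.map (fun p => p.1))
  let cols : PySem.Set Int := PySem.Set.ofList (board.map (fun p => p.2))
  let diffs : PySem.Set Int := PySem.Set.ofList (board.map (fun p => p.1 - p.2))
  let sums : PySem.Set Int := PySem.Set.ofList (board.map (fun p => p.1 + p.2))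
  PySem.Set.contains rows r || PySem.Set.contains cols c ||
  PySem.Set.contains diffs (r - c) || PySem.Set.contains sums (r + c)

-- ===== PRECONDITION & SPEC =====
def Spec_under_attack (board : List (Int × Int)) (r : Int) (c : Int) (out : Bool) : Prop := out = under_attack_alt board r c
instance (board : List (Int × Int)) (r : Int) (c : Int) (out : Bool) : Decidable (Spec_under_attack board r c out) := by unfold Spec_under_attack; infer_instance

-- ===== CLAIM (what is proved, stated in full; the proofs are below) =====
def Claim_equal_under_attack : Prop := ∀ (board : List (Int × Int)) (r : Int) (c : Int), Dom_under_attack board r c → Spec_under_attack board r c (under_attack board r c)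

-- ===== LEMMAS AND PROOFS =====

-- ===== VERDICT (by name: the statement is the Claim_ definition above) =====
lemma contains_ofList_int (xs : List Int) (a : Int) :
    PySem.Set.contains (PySem.Set.ofList xs) a = xs.contains a := by
  simp [PySem.Set.contains, PySem.Set.mem_ofList]

lemma under_attack_chars (board : List (Int × Int)) (r c : Int) :
    under_attack board r c =
      ((board.map (fun p => p.1)).contains r || (board.map (fun p => p.2)).contains c ||
       (board.map (fun p => p.1 - p.2)).contains (r - c) ||
       (board.map (fun p => p.1 + p.2)).contains (r + c)) := by
  induction board with
  | nil => simp [under_attack]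
  | cons p rest ih =>
    simp only [under_attack, List.map_cons, List.contains_cons]
    rw [ih]
    cases h1 : (r == p.1) <;> cases h2 : (c == p.2) <;>
      cases h3 : ((r - c) == (p.1 - p.2)) <;> cases h4 : ((r + c) == (p.1 + p.2)) <;>
      simp [Bool.or_assoc, Bool.or_comm, Bool.or_left_comm]

theorem under_attack_spec : Claim_equal_under_attack := by
  intro board r c _
  unfold Spec_under_attack
  rw [under_attack_chars]
  simp only [under_attack_alt, contains_ofList_int]
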